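-- pv_equiv track=rewrite | github.com/calssion/algorithm | IT名企算法/其他问题/Manacher算法(进阶问题).py | short
-- ===== SOURCE A (Python) =====
-- def manstr(s:str)->str:
--     s='#'+'#'.join(s)+'#'
--     return s
--
-- def short(s:str)->str: #进阶问题
--     if s is None or len(s)==0:return None
--     s1=manstr(s)
--     parr=[0]*len(s1)
--     index=pr=maxend=-1
--     for i in range(len(s1)):
--         parr[i]= pr>i and min(parr[2*index-i],pr-i) or 1
--         while i+parr[i]<len(s1) and i-parr[i]>-1:
--             if s1[i+parr[i]]==s1[i-parr[i]]:
--                 parr[i]+=1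
--             else:
--                 break
--         if i+parr[i]>pr:
--             pr=i+parr[i]
--             index=i
--         if pr==len(s1):#到达串尾,要添加的即当前中心无法到达的左部分
--             maxend=parr[i]
--             break
--     res=['']*(len(s)-maxend+1)
--     for i in range(len(res)):#把左部分逆序赋予res
--         res[len(res)-1-i]=s1[i*2+1]
--     return ''.join(res)
-- ===== SOURCE B (Python) =====
-- def short(s: str) -> str:
--     if s is None or len(s) == 0:
--         return None
--     for i in range(len(s)):
--         suf = s[i:]
--         if suf == suf[::-1]:
--             return s[:i][::-1]
-- ===== Notes on version B (the rewrite author's own statement) =====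
-- stated objective: simpler
-- what changed: Replaces Manacher's transformed-string radius computation (mirror seeding, expanding while-loop, break on reaching the end) with a direct scan for the smallest i such that s[i:] is a palindrome, returning the reversed prefix s[:i][::-1].
import Mathlib
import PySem

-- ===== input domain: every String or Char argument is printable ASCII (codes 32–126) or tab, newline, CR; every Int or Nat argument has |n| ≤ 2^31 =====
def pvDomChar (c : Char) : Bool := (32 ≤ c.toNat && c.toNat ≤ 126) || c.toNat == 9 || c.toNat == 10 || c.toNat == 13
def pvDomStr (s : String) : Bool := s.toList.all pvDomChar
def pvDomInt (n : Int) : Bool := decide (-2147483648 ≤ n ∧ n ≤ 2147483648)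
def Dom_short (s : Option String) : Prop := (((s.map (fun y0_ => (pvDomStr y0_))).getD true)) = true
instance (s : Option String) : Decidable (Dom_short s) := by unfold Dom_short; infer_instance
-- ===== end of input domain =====

-- B replaces A's Manacher radius computation by a direct scan for the smallest i
-- with s[i:] palindromic, returning s[:i][::-1]; objective: simpler, not faster.

-- ===== PORT A =====

-- manstr: '#' + '#'.join(s) + '#'
def pvManstr (l : List Char) : List Char := '#' :: l.flatMap (fun c => [c, '#'])

-- the inner `while` of A: expand parr[i] while s1[i+p] == s1[i-p] and in bounds
def pvExpandA (t : List Char) (i : Nat) (p : Int) : Int :=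
  if h : (i : Int) + p < t.length ∧ (i : Int) - p > -1 ∧
      PySem.List.pyGet? t ((i : Int) + p) = PySem.List.pyGet? t ((i : Int) - p) then
    pvExpandA t i (p + 1)
  else p
termination_by ((t.length : Int) - ((i : Int) + p)).toNat
decreasing_by omega

-- the `for i in range(len(s1))` loop of A, returning maxend (-1 if no break)
def pvLoopA (t : List Char) (i : Nat) (parr : List Int) (index pr : Int) : Int :=
  if _h : i < t.length then
    -- `pr>i and min(parr[2*index-i],pr-i) or 1`: a falsy (zero) min falls through to 1
    let seed : Int :=
      if pr > (i : Int) then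
        let m := min ((PySem.List.pyGet? parr (2 * index - (i : Int))).getD 0) (pr - (i : Int))
        if m ≠ 0 then m else 1
      else 1
    let p := pvExpandA t i seed
    let parr' := parr.set i p
    let index' := if (i : Int) + p > pr then (i : Int) else index
    let pr' := if (i : Int) + p > pr then (i : Int) + p else pr
    if pr' = (t.length : Int) then p
    else pvLoopA t (i + 1) parr' index' pr'
  else -1
termination_by t.length - i

def short (s : Option String) : Option String :=
  match s with
  | none => none
  | some str =>
    match str.toList with
    | [] => none
    | _ :: _ =>
      let l := str.toList
      let s1 := pvManstr l
      let parr := List.replicate s1.length (0 : Int)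
      let maxend := pvLoopA s1 0 parr (-1) (-1)
      let resLen := ((l.length : Int) - maxend + 1).toNat
      -- res[len(res)-1-i] = s1[i*2+1]; the '#' default is never used (index in range whenever the Python loop indexes)
      some (String.ofList (((List.range resLen).map
        (fun (i : Nat) => (PySem.List.pyGet? s1 (2 * ((i : Nat) : Int) + 1)).getD '#')).reverse))

-- ===== PORT B =====

-- `for i in range(len(s))`: first i with s[i:] == s[i:][::-1]; returns s[:i][::-1]
def pvLoopB (l : List Char) (i : Nat) : Option String :=
  if _h : i < l.length then
    let suf := l.drop i
    if suf = suf.reverse then some (String.ofList ((l.take i).reverse))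
    else pvLoopB l (i + 1)
  else none
termination_by l.length - i

def short_alt (s : Option String) : Option String :=
  match s with
  | none => none
  | some str =>
    match str.toList with
    | [] => none
    | _ :: _ => pvLoopB str.toList 0

-- ===== PRECONDITION & SPEC =====
def Spec_short (s : Option String) (out : Option String) : Prop := out = short_alt s
instance (s : Option String) (out : Option String) : Decidable (Spec_short s out) := by unfold Spec_short; infer_instance

-- ===== CLAIM (what is proved, stated in full; the proofs are below) =====
def Claim_equal_short : Prop := ∀ (s : Option String), Dom_short s → Spec_short s (short s)

-- ===== LEMMAS AND PROOFS =====

-- the one-step palindromicity condition checked by the while-loop at offset k from center i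
def pvCond (t : List Char) (i k : Nat) : Prop :=
  k ≤ i ∧ i + k < t.length ∧ t[i + k]? = t[i - k]?

-- the naive expansion in Nat, starting from offset p
def pvRadAux (t : List Char) (i p : Nat) : Nat :=
  if h : p ≤ i ∧ i + p < t.length ∧ t[i + p]? = t[i - p]? then pvRadAux t i (p + 1) else p
termination_by t.length - p
decreasing_by omega

-- the true palindromic radius at center i of t
def pvRad (t : List Char) (i : Nat) : Nat := pvRadAux t i 1

theorem pvRadAux_ge (t : List Char) (i p : Nat) : p ≤ pvRadAux t i p := by
  fun_induction pvRadAux t i p with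
  | case1 p h ih => omega
  | case2 p h => exact Nat.le_refl p

theorem pvRadAux_cond (t : List Char) (i p : Nat) :
    ∀ k, p ≤ k → k < pvRadAux t i p → pvCond t i k := by
  fun_induction pvRadAux t i p with
  | case1 p h ih =>
    intro k hk1 hk2
    rcases Nat.eq_or_lt_of_le hk1 with rfl | hk
    · exact h
    · exact ih k hk hk2
  | case2 p h => intro k hk1 hk2; omega

theorem pvRadAux_eq_rad (t : List Char) (i p : Nat) (h1 : 1 ≤ p)
    (h : ∀ k, 1 ≤ k → k < p → pvCond t i k) : pvRadAux t i p = pvRad t i := by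
  induction p, h1 using Nat.le_induction with
  | base => rfl
  | succ p hp ih =>
    have hc : pvCond t i p := h p hp (by omega)
    have hstep : pvRadAux t i p = pvRadAux t i (p + 1) := by
      rw [pvRadAux]; exact dif_pos hc
    rw [← hstep]
    exact ih (fun k hk1 hk2 => h k hk1 (by omega))

theorem pvRad_ge (t : List Char) (i q : Nat) (h : ∀ k, 1 ≤ k → k < q → pvCond t i k) :
    q ≤ pvRad t i := by
  rcases Nat.eq_zero_or_pos q with rfl | hq
  · exact Nat.zero_le _
  · rw [← pvRadAux_eq_rad t i q hq h]
    exact pvRadAux_ge t i q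

theorem pvRad_one_le (t : List Char) (i : Nat) : 1 ≤ pvRad t i :=
  pvRadAux_ge t i 1

theorem pvRad_le (t : List Char) (i : Nat) (hi : i < t.length) :
    pvRad t i ≤ i + 1 ∧ i + pvRad t i ≤ t.length := by
  have hge := pvRad_one_le t i
  have hdef : pvRadAux t i 1 = pvRad t i := rfl
  constructor
  · by_contra hcon
    have hc := pvRadAux_cond t i 1 (i + 1) (by omega) (by omega)
    exact absurd hc.1 (by omega)
  · by_contra hcon
    rcases Nat.lt_or_ge 1 (pvRad t i) with h1 | h1
    · have hc := pvRadAux_cond t i 1 (pvRad t i - 1) (by omega) (by omega)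
      exact absurd hc.2.1 (by omega)
    · omega

theorem pvCondZ_iff (t : List Char) (i p : Nat) :
    ((i : Int) + p < t.length ∧ (i : Int) - p > -1 ∧
      PySem.List.pyGet? t ((i : Int) + p) = PySem.List.pyGet? t ((i : Int) - p)) ↔
    (p ≤ i ∧ i + p < t.length ∧ t[i + p]? = t[i - p]?) := by
  have e1 : (i : Int) + p = ((i + p : Nat) : Int) := by push_cast; ring
  constructor
  · rintro ⟨h1, h2, h3⟩
    have hpi : p ≤ i := by omega
    have e2 : (i : Int) - p = ((i - p : Nat) : Int) := by omega
    rw [e1, e2, PySem.List.pyGet?_natCast, PySem.List.pyGet?_natCast] at h3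
    exact ⟨hpi, by omega, h3⟩
  · rintro ⟨h1, h2, h3⟩
    have e2 : (i : Int) - p = ((i - p : Nat) : Int) := by omega
    refine ⟨by omega, by omega, ?_⟩
    rw [e1, e2, PySem.List.pyGet?_natCast, PySem.List.pyGet?_natCast]
    exact h3

theorem pvExpandA_eq (t : List Char) (i p : Nat) :
    pvExpandA t i (p : Int) = ((pvRadAux t i p : Nat) : Int) := by
  fun_induction pvRadAux t i p with
  | case1 p h ih =>
    rw [pvExpandA, dif_pos ((pvCondZ_iff t i p).mpr h)]
    have : ((p : Int)) + 1 = ((p + 1 : Nat) : Int) := by push_cast; ring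
    rw [this]
    exact ih
  | case2 p h =>
    rw [pvExpandA, dif_neg]
    intro hz
    exact h ((pvCondZ_iff t i p).mp hz)

-- the Manacher mirror argument: the seed min(parr[2*index-i], pr-i) is a valid lower bound
theorem pvMirror (t : List Char) (index i : Nat) (hL : index < t.length)
    (hidx : index < i) (hpr : i < index + pvRad t index) :
    ∀ k, 1 ≤ k → k < min (pvRad t (2 * index - i)) (index + pvRad t index - i) →
      pvCond t i k := by
  intro k hk1 hk2
  set r := pvRad t index with hr
  have hrle := pvRad_le t index hL
  have hi2 : i ≤ 2 * index := by omega
  set j := 2 * index - i with hj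
  have hkj : k < pvRad t j := by omega
  have hkpr : k < index + r - i := by omega
  have condJ : ∀ m, 1 ≤ m → m < pvRad t j → pvCond t j m :=
    fun m hm1 hm2 => pvRadAux_cond t j 1 m hm1 hm2
  have condI : ∀ m, 1 ≤ m → m < r → pvCond t index m :=
    fun m hm1 hm2 => pvRadAux_cond t index 1 m hm1 hm2
  obtain ⟨hc1, hc2, hc3⟩ := condJ k hk1 hkj
  -- t[i+k]? = t[j-k]? by reflecting i+k through the center `index`
  have e3 : t[i + k]? = t[j - k]? := by
    obtain ⟨hm1, hm2, hm3⟩ := condI (i + k - index) (by omega) (by omega)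
    have e : index + (i + k - index) = i + k := by omega
    have e' : index - (i + k - index) = j - k := by omega
    rw [e, e'] at hm3; exact hm3
  -- t[j+k]? = t[i-k]? by reflecting through the center `index`
  have e5 : t[j + k]? = t[i - k]? := by
    rcases Nat.lt_trichotomy (i - k) index with hcase | hcase | hcase
    · obtain ⟨hm1, hm2, hm3⟩ := condI (index + k - i) (by omega) (by omega)
      have e : index + (index + k - i) = j + k := by omega
      have e' : index - (index + k - i) = i - k := by omega
      rw [e, e'] at hm3; exact hm3
    · have e : j + k = index := by omega
      rw [e, ← hcase]
    · obtain ⟨hm1, hm2, hm3⟩ := condI (i - k - index) (by omega) (by omega)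
      have e : index + (i - k - index) = i - k := by omega
      have e' : index - (i - k - index) = j + k := by omega
      rw [e, e'] at hm3; exact hm3.symm
  exact ⟨by omega, by omega, by rw [e3, ← hc3, e5]⟩

def pvReach (t : List Char) (i : Nat) : Prop := i + pvRad t i = t.length

theorem pvLoopA_eq (t : List Char) (i0 : Nat) (h0 : pvReach t i0)
    (hmin : ∀ j, j < i0 → ¬ pvReach t j) :
    ∀ fuel i, t.length - i ≤ fuel → i ≤ i0 →
    ∀ (parr : List Int), parr.length = t.length →
    (∀ j, j < i → parr[j]? = some ((pvRad t j : Nat) : Int)) →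
    ∀ (index pr : Int),
    ((i = 0 ∧ index = -1 ∧ pr = -1) ∨
      (∃ idx : Nat, idx < i ∧ index = (idx : Int) ∧ pr = ((idx + pvRad t idx : Nat) : Int))) →
    pvLoopA t i parr index pr = ((pvRad t i0 : Nat) : Int) := by
  have hi0L : i0 < t.length := by
    have := pvRad_one_le t i0
    have h0' : i0 + pvRad t i0 = t.length := h0
    omega
  intro fuel
  induction fuel with
  | zero =>
    intro i hf hi _ _ _ _ _ _
    exact absurd hf (Nat.not_le.mpr (Nat.sub_pos_of_lt (Nat.lt_of_le_of_lt hi hi0L)))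
  | succ fuel ih =>
    intro i hf hi parr hlen hparr index pr hstate
    have hiL : i < t.length := Nat.lt_of_le_of_lt hi hi0L
    have hfuel' : t.length - (i + 1) ≤ fuel := by omega
    have hradle := pvRad_le t i hiL
    have hr1 := pvRad_one_le t i
    rw [pvLoopA, dif_pos hiL]
    simp only []
    -- the seed is a Nat value s0 ≥ 1 all of whose lower offsets satisfy pvCond
    obtain ⟨s0, hs0seed, hs01, hs0cond⟩ :
        ∃ s0 : Nat,
          (if pr > (i : Int) then
            (let m := min ((PySem.List.pyGet? parr (2 * index - (i : Int))).getD 0) (pr - (i : Int));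
             if m ≠ 0 then m else 1)
          else 1) = ((s0 : Nat) : Int) ∧ 1 ≤ s0 ∧ (∀ k, 1 ≤ k → k < s0 → pvCond t i k) := by
      by_cases hgt : pr > (i : Int)
      · rcases hstate with ⟨-, -, hpr⟩ | ⟨idx, hidxlt, hindex, hpr⟩
        · exfalso; rw [hpr] at hgt; omega
        · have hidxL : idx < t.length := by omega
          have hradidx := pvRad_le t idx hidxL
          have hridx1 := pvRad_one_le t idx
          have hIlt : i < idx + pvRad t idx := by rw [hpr] at hgt; exact_mod_cast by omega
          have hi2 : i ≤ 2 * idx := by omega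
          have hjlt : 2 * idx - i < i := by omega
          have hrj1 := pvRad_one_le t (2 * idx - i)
          have hmir := pvMirror t idx i hidxL hidxlt hIlt
          refine ⟨min (pvRad t (2 * idx - i)) (idx + pvRad t idx - i), ?_, by omega, hmir⟩
          rw [if_pos hgt, hindex, hpr]
          have e1 : 2 * (idx : Int) - (i : Int) = ((2 * idx - i : Nat) : Int) := by omega
          rw [e1, PySem.List.pyGet?_natCast, hparr _ hjlt]
          simp only [Option.getD_some]
          have e2 : min ((pvRad t (2 * idx - i) : Nat) : Int)
              (((idx + pvRad t idx : Nat) : Int) - (i : Int))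
              = ((min (pvRad t (2 * idx - i)) (idx + pvRad t idx - i) : Nat) : Int) := by omega
          rw [e2]
          rw [if_pos]
          omega
      · exact ⟨1, by rw [if_neg hgt]; norm_num, by omega, by omega⟩
    rw [hs0seed]
    have hexp : pvExpandA t i ((s0 : Nat) : Int) = ((pvRad t i : Nat) : Int) := by
      rw [pvExpandA_eq t i s0, pvRadAux_eq_rad t i s0 hs01 hs0cond]
    rw [hexp]
    -- pr < len(t) before this step
    have hprlt : pr < (t.length : Int) := by
      rcases hstate with ⟨-, -, hpr⟩ | ⟨idx, hidxlt, -, hpr⟩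
      · rw [hpr]; omega
      · have hnr : ¬ pvReach t idx := hmin idx (by omega)
        have : idx + pvRad t idx ≠ t.length := hnr
        have hidxle := pvRad_le t idx (by omega)
        rw [hpr]
        exact_mod_cast by omega
    rcases Nat.eq_or_lt_of_le hi with rfl | hlt
    · -- i = i0: the break fires and returns parr[i] = rad i0
      have hreach : i + pvRad t i = t.length := h0
      have hupd : (i : Int) + ((pvRad t i : Nat) : Int) > pr := by omega
      rw [if_pos hupd, if_pos hupd, if_pos (by omega)]
    · -- i < i0: no break; recurse with the updated state
      have hnr : i + pvRad t i ≠ t.length := hmin i hlt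
      have hne : ¬ ((if (i : Int) + ((pvRad t i : Nat) : Int) > pr
            then (i : Int) + ((pvRad t i : Nat) : Int) else pr) = (t.length : Int)) := by
        split <;> omega
      rw [if_neg hne]
      have hlen' : (parr.set i ((pvRad t i : Nat) : Int)).length = t.length := by
        simpa using hlen
      have hparr' : ∀ j, j < i + 1 →
          (parr.set i ((pvRad t i : Nat) : Int))[j]? = some ((pvRad t j : Nat) : Int) := by
        intro j hj
        rcases Nat.eq_or_lt_of_le (Nat.lt_succ_iff.mp hj) with rfl | hjlt
        · rw [List.getElem?_set_self (by omega)]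
        · rw [List.getElem?_set_ne (by omega), hparr j hjlt]
      have hstate' : ((i + 1 = 0 ∧ (if (i : Int) + ((pvRad t i : Nat) : Int) > pr then (i : Int) else index) = -1 ∧ (if (i : Int) + ((pvRad t i : Nat) : Int) > pr then (i : Int) + ((pvRad t i : Nat) : Int) else pr) = -1) ∨
          (∃ idx : Nat, idx < i + 1 ∧ (if (i : Int) + ((pvRad t i : Nat) : Int) > pr then (i : Int) else index) = (idx : Int) ∧ (if (i : Int) + ((pvRad t i : Nat) : Int) > pr then (i : Int) + ((pvRad t i : Nat) : Int) else pr) = ((idx + pvRad t idx : Nat) : Int))) := by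
        by_cases hupd : (i : Int) + ((pvRad t i : Nat) : Int) > pr
        · refine Or.inr ⟨i, by omega, by rw [if_pos hupd], by rw [if_pos hupd]; push_cast; ring⟩
        · rcases hstate with ⟨-, -, hpr⟩ | ⟨idx, hidxlt, hindex, hpr⟩
          · exfalso; rw [hpr] at hupd; omega
          · exact Or.inr ⟨idx, by omega, by rw [if_neg hupd]; exact hindex, by rw [if_neg hupd]; exact hpr⟩
      exact ih (i + 1) hfuel' (by omega) _ hlen' hparr' _ _ hstate'

theorem pvManstr_cons (c : Char) (l : List Char) :
    pvManstr (c :: l) = '#' :: c :: pvManstr l := by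
  simp [pvManstr]

theorem pvManstr_length (l : List Char) : (pvManstr l).length = 2 * l.length + 1 := by
  induction l with
  | nil => rfl
  | cons c l ih => rw [pvManstr_cons]; simp [ih]; omega

theorem pvManstr_get_even (l : List Char) (a : Nat) (ha : a ≤ l.length) :
    (pvManstr l)[2 * a]? = some '#' := by
  induction l generalizing a with
  | nil =>
    have : a = 0 := by simpa using ha
    subst this; rfl
  | cons c l ih =>
    match a with
    | 0 => rfl
    | a + 1 =>
      rw [pvManstr_cons]
      have e : 2 * (a + 1) = 2 * a + 1 + 1 := by omega
      rw [e, List.getElem?_cons_succ, List.getElem?_cons_succ]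
      exact ih a (by simpa using ha)

theorem pvManstr_get_odd (l : List Char) (a : Nat) :
    (pvManstr l)[2 * a + 1]? = l[a]? := by
  induction l generalizing a with
  | nil =>
    have h1 : (pvManstr ([] : List Char)).length = 1 := rfl
    rw [List.getElem?_eq_none (by omega), List.getElem?_eq_none (by simp)]
  | cons c l ih =>
    match a with
    | 0 => rfl
    | a + 1 =>
      rw [pvManstr_cons]
      have e : 2 * (a + 1) + 1 = 2 * a + 1 + 1 + 1 := by omega
      rw [e, List.getElem?_cons_succ, List.getElem?_cons_succ, ih a, List.getElem?_cons_succ]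

-- reach at center m + n ↔ the suffix l.drop m is a palindrome
theorem pvPal_iff (u : List Char) :
    u.reverse = u ↔ ∀ x, x < u.length → u[x]? = u[u.length - 1 - x]? := by
  constructor
  · intro h x hx
    conv_lhs => rw [← h]
    rw [List.getElem?_reverse hx]
  · intro h
    apply List.ext_getElem?
    intro x
    by_cases hx : x < u.length
    · rw [List.getElem?_reverse (by simpa using hx), (h x hx).symm]
    · rw [List.getElem?_eq_none (by simpa using hx), List.getElem?_eq_none (by omega)]

theorem pvReach_iff (l : List Char) (m : Nat) (hm : m ≤ l.length) :
    pvReach (pvManstr l) (m + l.length) ↔ (l.drop m).reverse = l.drop m := by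
  set n := l.length with hn
  set t := pvManstr l with ht
  set c := m + n with hc
  set M := n - m with hM
  have hL : t.length = 2 * n + 1 := pvManstr_length l
  have hcL : c < t.length := by omega
  have hrle := pvRad_le t c hcL
  have hr1 := pvRad_one_le t c
  have hdefr : pvRadAux t c 1 = pvRad t c := rfl
  -- the palindrome condition of the suffix, pointwise in l
  have hdropLen : (l.drop m).length = M := by simp [hM, hn]
  have hpal_iff : ((l.drop m).reverse = l.drop m) ↔ (∀ x, x < M → l[m + x]? = l[n - 1 - x]?) := by
    rw [pvPal_iff]
    constructor
    · intro h x hx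
      have := h x (by omega)
      rwa [List.getElem?_drop, List.getElem?_drop, hdropLen,
        show m + (M - 1 - x) = n - 1 - x by omega] at this
    · intro h x hx
      rw [hdropLen] at hx ⊢
      rw [List.getElem?_drop, List.getElem?_drop, h x hx,
        show m + (M - 1 - x) = n - 1 - x by omega]
  constructor
  · intro hreach
    have hrad : pvRad t c = M + 1 := by
      have : c + pvRad t c = t.length := hreach
      omega
    have hcond : ∀ k, 1 ≤ k → k ≤ M → pvCond t c k := by
      intro k hk1 hk2
      exact pvRadAux_cond t c 1 k hk1 (by omega)
    rw [hpal_iff]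
    intro x hx
    rcases Nat.lt_trichotomy (2 * x) (M - 1) with hcase | hcase | hcase
    · obtain ⟨-, -, h3⟩ := hcond (M - 1 - 2 * x) (by omega) (by omega)
      rwa [show c + (M - 1 - 2 * x) = 2 * (n - 1 - x) + 1 by omega,
        show c - (M - 1 - 2 * x) = 2 * (m + x) + 1 by omega,
        pvManstr_get_odd, pvManstr_get_odd, eq_comm] at h3
    · rw [show m + x = n - 1 - x by omega]
    · obtain ⟨-, -, h3⟩ := hcond (2 * x - (M - 1)) (by omega) (by omega)
      rwa [show c + (2 * x - (M - 1)) = 2 * (m + x) + 1 by omega,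
        show c - (2 * x - (M - 1)) = 2 * (n - 1 - x) + 1 by omega,
        pvManstr_get_odd, pvManstr_get_odd] at h3
  · intro hpal
    have hpal' := hpal_iff.mp hpal
    have hcond : ∀ k, 1 ≤ k → k < M + 1 → pvCond t c k := by
      intro k hk1 hk2
      refine ⟨by omega, by omega, ?_⟩
      rcases Nat.even_or_odd (c + k) with ⟨a, hae⟩ | ⟨a, hao⟩
      · rw [show c + k = 2 * a by omega, show c - k = 2 * (a - k) by omega,
          pvManstr_get_even l a (by omega), pvManstr_get_even l (a - k) (by omega)]
      · rw [show c + k = 2 * a + 1 by omega, show c - k = 2 * (a - k) + 1 by omega,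
          pvManstr_get_odd, pvManstr_get_odd]
        have := hpal' (n - 1 - a) (by omega)
        rwa [show m + (n - 1 - a) = a - k by omega,
          show n - 1 - (n - 1 - a) = a by omega, eq_comm] at this
    have hge := pvRad_ge t c (M + 1) hcond
    show c + pvRad t c = t.length
    omega

theorem pvLoopB_eq (l : List Char) (ib : Nat) (hib : ib < l.length)
    (hpal : (l.drop ib).reverse = l.drop ib)
    (hminb : ∀ j, j < ib → ¬ (l.drop j).reverse = l.drop j) :
    ∀ fuel i, l.length - i ≤ fuel → i ≤ ib →
    pvLoopB l i = some (String.ofList ((l.take ib).reverse)) := by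
  intro fuel
  induction fuel with
  | zero => intro i hf hi; omega
  | succ fuel ih =>
    intro i hf hi
    have hiL : i < l.length := by omega
    rw [pvLoopB, dif_pos hiL]
    rcases Nat.eq_or_lt_of_le hi with rfl | hlt
    · rw [if_pos hpal.symm]
    · rw [if_neg (fun h => hminb i hlt h.symm)]
      exact ih (i + 1) (by omega) (by omega)

theorem pvTake_eq (l : List Char) (m : Nat) (hm : m ≤ l.length) :
    (List.range m).map (fun (i : Nat) => (PySem.List.pyGet? (pvManstr l) (2 * ((i : Nat) : Int) + 1)).getD '#')
      = l.take m := by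
  apply List.ext_getElem
  · simp [List.length_take]; omega
  · intro x hx1 hx2
    simp only [List.getElem_map, List.getElem_range, List.getElem_take]
    have hxm : x < m := by simpa using hx1
    have e : 2 * ((x : Nat) : Int) + 1 = ((2 * x + 1 : Nat) : Int) := by push_cast; ring
    rw [e, PySem.List.pyGet?_natCast, pvManstr_get_odd, List.getElem?_eq_getElem (by omega)]
    rfl

theorem pvMain (l : List Char) (c : Char) (l' : List Char) (hl : l = c :: l') :
    some (String.ofList (((List.range
        (((l.length : Int) - pvLoopA (pvManstr l) 0 (List.replicate (pvManstr l).length 0) (-1) (-1) + 1).toNat)).map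
        (fun (i : Nat) => (PySem.List.pyGet? (pvManstr l) (2 * ((i : Nat) : Int) + 1)).getD '#')).reverse))
      = pvLoopB l 0 := by
  have hn : 1 ≤ l.length := by rw [hl]; simp
  set n := l.length with hnn
  set t := pvManstr l with ht
  have hL : t.length = 2 * n + 1 := pvManstr_length l
  have hexP : ∃ j, (l.drop j).reverse = l.drop j := by
    refine ⟨n - 1, ?_⟩
    have hlen1 : (l.drop (n - 1)).length = 1 := by rw [List.length_drop]; omega
    obtain ⟨a, ha⟩ := List.length_eq_one_iff.mp hlen1
    rw [ha]; rfl
  set ib := Nat.find hexP with hib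
  have hpal : (l.drop ib).reverse = l.drop ib := Nat.find_spec hexP
  have hminb : ∀ j, j < ib → ¬ (l.drop j).reverse = l.drop j := fun j hj => Nat.find_min hexP hj
  have hibn : ib < n := by
    have h1 : ib ≤ n - 1 := Nat.find_min' hexP (by
      have hlen1 : (l.drop (n - 1)).length = 1 := by rw [List.length_drop]; omega
      obtain ⟨a, ha⟩ := List.length_eq_one_iff.mp hlen1
      rw [ha]; rfl)
    omega
  have hreach : pvReach t (ib + n) := (pvReach_iff l ib (by omega)).mpr hpal
  have hmin : ∀ j, j < ib + n → ¬ pvReach t j := by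
    intro j hj hreachj
    rcases Nat.lt_or_ge j n with hjn | hjn
    · have hjL : j < t.length := by omega
      have hle := pvRad_le t j hjL
      have h' : j + pvRad t j = t.length := hreachj
      omega
    · have hjm : j - n < ib := by omega
      have h' : pvReach t ((j - n) + n) := by rwa [show j - n + n = j by omega]
      exact hminb (j - n) hjm ((pvReach_iff l (j - n) (by omega)).mp h')
  have hrad : pvRad t (ib + n) = n + 1 - ib := by
    have h' : (ib + n) + pvRad t (ib + n) = t.length := hreach
    omega
  have hloopA : pvLoopA t 0 (List.replicate t.length 0) (-1) (-1) = ((pvRad t (ib + n) : Nat) : Int) :=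
    pvLoopA_eq t (ib + n) hreach hmin t.length 0 (by omega) (by omega) _ (by simp)
      (fun j hj => absurd hj (Nat.not_lt_zero j)) (-1) (-1) (Or.inl ⟨rfl, rfl, rfl⟩)
  rw [hloopA, hrad]
  have hres : (((n : Int) - ((n + 1 - ib : Nat) : Int) + 1).toNat) = ib := by omega
  rw [hres, pvTake_eq l ib (by omega)]
  exact (pvLoopB_eq l ib hibn hpal hminb l.length 0 (by omega) (by omega)).symm

-- ===== VERDICT (by name: the statement is the Claim_ definition above) =====
theorem short_spec : Claim_equal_short := by
  intro s _
  unfold Spec_short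
  match s with
  | none => rfl
  | some str =>
    cases hl : str.toList with
    | nil => simp only [short, short_alt, hl]
    | cons c l' =>
      simp only [short, short_alt, hl]
      exact pvMain (c :: l') c l' rfl
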